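-- pv_equiv track=rewrite | github.com/nizari08-max/SCLL-TOOL | format_detector.py | _score_header_row
-- ===== SOURCE A (Python) =====
-- def _score_header_row(headers: list[str], field_patterns: dict[str, list[str]]) -> int:
--     matched: set[str] = set()
--     score = 0
--     for cell in headers:
--         if not cell:
--             continue
--         cell_lower = cell.lower()
--         for field, patterns in field_patterns.items():
--             if field in matched:
--                 continue
--             for pat in patterns:
--                 if pat in cell_lower:
--                     matched.add(field)
--                     score += 1
--                     break
--     non_empty = sum(1 for h in headers if h)
--     return score * 10 + non_empty
-- ===== SOURCE B (Python) =====
-- def _score_header_row(headers: list[str], field_patterns: dict[str, list[str]]) -> int: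
--     cells = [c.lower() for c in headers if c]
--     matched = sum(
--         1
--         for patterns in field_patterns.values()
--         if any(pat in cell for cell in cells for pat in patterns)
--     )
--     return matched * 10 + len(cells)
-- ===== Notes on version B (the rewrite author's own statement) =====
-- stated objective: simpler
-- what changed: Field-outer instead of cell-outer: B drops A's mutable matched-set, incremental score and break bookkeeping and instead counts, per field, whether any non-empty lowered cell contains one of its patterns (a short-circuiting existence test over pre-lowered cells), plus a separate non-empty count.
import Mathlib
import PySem

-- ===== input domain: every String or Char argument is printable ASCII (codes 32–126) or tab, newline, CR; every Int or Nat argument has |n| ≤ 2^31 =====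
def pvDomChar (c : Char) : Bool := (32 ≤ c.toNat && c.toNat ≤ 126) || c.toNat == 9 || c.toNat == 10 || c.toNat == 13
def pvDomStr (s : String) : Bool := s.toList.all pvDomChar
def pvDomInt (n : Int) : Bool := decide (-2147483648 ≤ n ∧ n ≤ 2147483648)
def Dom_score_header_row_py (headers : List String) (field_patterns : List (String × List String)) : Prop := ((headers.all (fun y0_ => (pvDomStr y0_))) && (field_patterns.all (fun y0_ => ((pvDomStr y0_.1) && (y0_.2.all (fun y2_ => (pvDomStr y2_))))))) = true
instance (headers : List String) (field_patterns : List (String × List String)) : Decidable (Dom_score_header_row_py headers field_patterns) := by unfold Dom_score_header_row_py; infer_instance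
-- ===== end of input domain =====

-- B restructures A field-outer (per-field existence test) instead of cell-outer with a matched-set; objective: simpler.

-- ===== PORT A =====
-- 'for pat in patterns: if pat in cell_lower: …; break' — break-style scan of the patterns
def pvScanPats (cl : String) : List String → Bool
  | [] => false
  | p :: rest => if PySem.Str.isIn p cl then true else pvScanPats cl rest

def score_header_row_py (headers : List String) (field_patterns : List (String × List String)) : Int :=
  let st := headers.foldl (fun st cell =>
    if cell == "" then st
    else
      let cl := PySem.Str.lower cell
      field_patterns.foldl (fun st pr =>
        if PySem.Set.contains st.1 pr.1 then st
        else if pvScanPats cl pr.2 then (PySem.Set.add st.1 pr.1, st.2 + 1) else st) st)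
    ((PySem.Set.empty : PySem.Set String), (0 : Int))
  st.2 * 10 + ((headers.countP (fun h => !(h == ""))) : Int)

-- ===== PORT B =====
def score_header_row_py_alt (headers : List String) (field_patterns : List (String × List String)) : Int :=
  let cells := (headers.filter (fun c => !(c == ""))).map PySem.Str.lower
  let matched := field_patterns.countP (fun pr =>
    cells.any (fun cell => pr.2.any (fun pat => PySem.Str.isIn pat cell)))
  (matched : Int) * 10 + (cells.length : Int)

-- ===== PRECONDITION & SPEC =====
-- Pre_ only requires distinct field names: the Python argument is a dict, whose keys are
-- necessarily distinct, so this excludes no input the Python A actually receives.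
def Pre_score_header_row_py (_headers : List String) (field_patterns : List (String × List String)) : Prop :=
  (field_patterns.map Prod.fst).Nodup
instance (headers : List String) (field_patterns : List (String × List String)) : Decidable (Pre_score_header_row_py headers field_patterns) := by unfold Pre_score_header_row_py; infer_instance

def pvWitness_score_header_row_py : List String × (List (String × List String)) :=
  (["Name", "", "Date of Birth"], [("name", ["name"]), ("dob", ["birth", "dob"]), ("id", ["id"])])

def Spec_score_header_row_py (headers : List String) (field_patterns : List (String × List String)) (out : Int) : Prop := out = score_header_row_py_alt headers field_patterns
instance (headers : List String) (field_patterns : List (String × List String)) (out : Int) : Decidable (Spec_score_header_row_py headers field_patterns out) := by unfold Spec_score_header_row_py; infer_instance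

-- ===== CLAIM (what is proved, stated in full; the proofs are below) =====
def Claim_equal_score_header_row_py : Prop := ∀ (headers : List String) (field_patterns : List (String × List String)), Dom_score_header_row_py headers field_patterns → Pre_score_header_row_py headers field_patterns → Spec_score_header_row_py headers field_patterns (score_header_row_py headers field_patterns)

-- ===== LEMMAS AND PROOFS =====

lemma pvScanPats_eq_any (cl : String) (pats : List String) :
    pvScanPats cl pats = pats.any (fun p => PySem.Str.isIn p cl) := by
  induction pats with
  | nil => rfl
  | cons p rest ih =>
    simp only [pvScanPats, List.any_cons, ih]
    cases PySem.Str.isIn p cl <;> simp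

-- whether cell `c` (original, possibly empty) matches entry `pr`
def pvCellMatch (pr : String × List String) (c : String) : Bool :=
  !(c == "") && pr.2.any (fun pat => PySem.Str.isIn pat (PySem.Str.lower c))

lemma pv_contains_add (s : PySem.Set String) (x y : String) :
    PySem.Set.contains (PySem.Set.add s x) y = (PySem.Set.contains s y || y == x) := by
  cases h : y == x <;> simp_all

-- with distinct keys, scanning all entries for pr's key reduces to pr's own patterns
lemma pv_any_key (cl : String) (fps : List (String × List String))
    (hnd : (fps.map Prod.fst).Nodup) (pr : String × List String) (hmem : pr ∈ fps) :
    fps.any (fun q => q.1 == pr.1 && pvScanPats cl q.2) = pvScanPats cl pr.2 := by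
  induction fps with
  | nil => cases hmem
  | cons q rest ih =>
    simp only [List.map_cons, List.nodup_cons] at hnd
    rcases List.mem_cons.mp hmem with h | h
    · subst h
      have : rest.any (fun q => q.1 == pr.1 && pvScanPats cl q.2) = false := by
        rw [List.any_eq_false]
        intro x hx
        have : x.1 ≠ pr.1 := by
          intro he; exact hnd.1 (he ▸ List.mem_map_of_mem hx)
        simp [this]
      simp [List.any_cons, this]
    · have hq : q.1 ≠ pr.1 := by
        intro he
        exact hnd.1 (he ▸ List.mem_map_of_mem h)
      simp only [List.any_cons, ih hnd.2 h]
      simp [hq]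

-- split a countP of a disjunction of pointwise-disjoint predicates into a sum
lemma pv_countP_or {α : Type} (p q : α → Bool) (l : List α)
    (hdisj : ∀ x ∈ l, ¬(p x = true ∧ q x = true)) :
    l.countP (fun x => p x || q x) = l.countP p + l.countP q := by
  induction l with
  | nil => rfl
  | cons a l ih =>
    have h := hdisj a (List.mem_cons_self ..)
    simp only [List.countP_cons]
    rw [ih (fun x hx => hdisj x (List.mem_cons_of_mem _ hx))]
    by_cases hp : p a <;> by_cases hq : q a <;> simp_all <;> omega

lemma pv_countP_ext {α : Type} {p q : α → Bool} {l : List α} (h : ∀ x ∈ l, p x = q x) :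
    l.countP p = l.countP q :=
  List.countP_congr (fun x hx => by rw [h x hx])

-- the inner loop: one non-empty cell, one pass over field_patterns
lemma pv_inner (cl : String) (fps : List (String × List String))
    (hnd : (fps.map Prod.fst).Nodup) (m : PySem.Set String) (s : Int) :
    (fps.foldl (fun st pr =>
        if PySem.Set.contains st.1 pr.1 then st
        else if pvScanPats cl pr.2 then (PySem.Set.add st.1 pr.1, st.2 + 1) else st) (m, s)).2
      = s + (fps.countP (fun pr => !(PySem.Set.contains m pr.1) && pvScanPats cl pr.2) : Int)
    ∧ ∀ g, PySem.Set.contains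
        (fps.foldl (fun st pr =>
          if PySem.Set.contains st.1 pr.1 then st
          else if pvScanPats cl pr.2 then (PySem.Set.add st.1 pr.1, st.2 + 1) else st) (m, s)).1 g
      = (PySem.Set.contains m g || fps.any (fun pr => pr.1 == g && pvScanPats cl pr.2)) := by
  induction fps generalizing m s with
  | nil => simp
  | cons pr rest ih =>
    simp only [List.map_cons, List.nodup_cons] at hnd
    rw [List.foldl_cons]
    by_cases hm : PySem.Set.contains m pr.1
    · rw [if_pos hm]
      rw [PySem.Set.contains_iff] at hm
      obtain ⟨h1, h2⟩ := ih hnd.2 m s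
      refine ⟨?_, ?_⟩
      · rw [h1, List.countP_cons]
        simp [hm]
      · intro g
        rw [h2 g, List.any_cons]
        by_cases hg : pr.1 = g
        · subst hg; simp [hm]
        · have hb : (pr.1 == g) = false := by simp [hg]
          rw [hb]
          simp
    · rw [if_neg hm]
      rw [PySem.Set.contains_iff] at hm
      by_cases hs : pvScanPats cl pr.2
      · rw [if_pos hs]
        obtain ⟨h1, h2⟩ := ih hnd.2 (PySem.Set.add m pr.1) (s + 1)
        have hcnt : rest.countP
              (fun q => !(PySem.Set.contains (PySem.Set.add m pr.1) q.1) && pvScanPats cl q.2)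
            = rest.countP (fun q => !(PySem.Set.contains m q.1) && pvScanPats cl q.2) := by
          apply List.countP_congr
          intro q hq
          have hne : q.1 ≠ pr.1 := by
            intro he; exact hnd.1 (he ▸ List.mem_map_of_mem hq)
          simp [hne]
        refine ⟨?_, ?_⟩
        · rw [h1, hcnt, List.countP_cons]
          have hb : (!(PySem.Set.contains m pr.1) && pvScanPats cl pr.2) = true := by
            simp [hm, hs]
          rw [hb]
          simp
          omega
        · intro g
          rw [h2 g, List.any_cons, pv_contains_add]
          by_cases hg : pr.1 = g
          · subst hg; simp [hs]
          · have hb : (pr.1 == g) = false := by simp [hg]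
            have hb2 : (g == pr.1) = false := by simp [Ne.symm hg]
            rw [hb, hb2]
            simp
      · rw [if_neg hs]
        obtain ⟨h1, h2⟩ := ih hnd.2 m s
        refine ⟨?_, ?_⟩
        · rw [h1, List.countP_cons]
          simp [hs]
        · intro g
          rw [h2 g, List.any_cons]
          by_cases hg : pr.1 = g
          · subst hg; simp [hs]
          · have hb : (pr.1 == g) = false := by simp [hg]
            rw [hb]
            simp

-- the outer loop: matched-set bookkeeping collapses to a per-field existence count
lemma pv_outer (headers : List String) (fps : List (String × List String))
    (hnd : (fps.map Prod.fst).Nodup) (m : PySem.Set String) (s : Int) :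
    (headers.foldl (fun st cell =>
        if cell == "" then st
        else
          let cl := PySem.Str.lower cell
          fps.foldl (fun st pr =>
            if PySem.Set.contains st.1 pr.1 then st
            else if pvScanPats cl pr.2 then (PySem.Set.add st.1 pr.1, st.2 + 1) else st) st) (m, s)).2
      = s + (fps.countP (fun pr => !(PySem.Set.contains m pr.1) && headers.any (pvCellMatch pr)) : Int) := by
  induction headers generalizing m s with
  | nil => simp
  | cons c rest ih =>
    rw [List.foldl_cons]
    by_cases hc : c == ""
    · rw [if_pos hc, ih m s]
      have : ∀ pr ∈ fps, (!(PySem.Set.contains m pr.1) && (rest.any (pvCellMatch pr)))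
          = (!(PySem.Set.contains m pr.1) && ((c :: rest).any (pvCellMatch pr))) := by
        intro pr _
        simp [List.any_cons, pvCellMatch, hc]
      rw [pv_countP_ext this]
    · rw [if_neg hc]
      simp only []
      obtain ⟨h1, h2⟩ := pv_inner (PySem.Str.lower c) fps hnd m s
      set st1 := fps.foldl (fun st pr =>
            if PySem.Set.contains st.1 pr.1 then st
            else if pvScanPats (PySem.Str.lower c) pr.2 then (PySem.Set.add st.1 pr.1, st.2 + 1) else st) (m, s) with hst1
      have heta : st1 = (st1.1, st1.2) := rfl
      rw [heta, ih st1.1 st1.2, h1]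
      have hpt : ∀ pr ∈ fps, (!(PySem.Set.contains st1.1 pr.1) && rest.any (pvCellMatch pr))
          = ((!(PySem.Set.contains m pr.1) && !(pvScanPats (PySem.Str.lower c) pr.2)) && rest.any (pvCellMatch pr)) := by
        intro pr hmem
        rw [h2 pr.1, pv_any_key (PySem.Str.lower c) fps hnd pr hmem]
        cases PySem.Set.contains m pr.1 <;> cases pvScanPats (PySem.Str.lower c) pr.2 <;> simp
      rw [pv_countP_ext hpt]
      have hsplit : fps.countP (fun pr => !(PySem.Set.contains m pr.1) && ((c :: rest).any (pvCellMatch pr)))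
          = fps.countP (fun pr => !(PySem.Set.contains m pr.1) && pvScanPats (PySem.Str.lower c) pr.2)
            + fps.countP (fun pr => (!(PySem.Set.contains m pr.1) && !(pvScanPats (PySem.Str.lower c) pr.2)) && rest.any (pvCellMatch pr)) := by
        rw [← pv_countP_or]
        · apply pv_countP_ext
          intro pr _
          have hcell : pvCellMatch pr c = pvScanPats (PySem.Str.lower c) pr.2 := by
            simp [pvCellMatch, hc, pvScanPats_eq_any]
          rw [List.any_cons, hcell]
          cases PySem.Set.contains m pr.1 <;> cases pvScanPats (PySem.Str.lower c) pr.2 <;>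
            cases rest.any (pvCellMatch pr) <;> simp
        · intro pr _
          cases pvScanPats (PySem.Str.lower c) pr.2 <;> simp
      rw [hsplit]
      push_cast
      ring

-- ===== VERDICT (by name: the statement is the Claim_ definition above) =====
theorem score_header_row_py_spec : Claim_equal_score_header_row_py := by
  intro headers fps _ hpre
  unfold Spec_score_header_row_py score_header_row_py score_header_row_py_alt
  simp only []
  rw [pv_outer headers fps hpre PySem.Set.empty 0]
  have hmatch : fps.countP (fun pr => !(PySem.Set.contains PySem.Set.empty pr.1) && headers.any (pvCellMatch pr))
      = fps.countP (fun pr => ((headers.filter (fun c => !(c == ""))).map PySem.Str.lower).any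
          (fun cell => pr.2.any (fun pat => PySem.Str.isIn pat cell))) := by
    apply pv_countP_ext
    intro pr _
    have hfun : pvCellMatch pr
        = fun c => !(c == "") && pr.2.any (fun pat => PySem.Str.isIn pat (PySem.Str.lower c)) := rfl
    rw [hfun]
    simp [PySem.Set.empty, List.any_map, List.any_filter]
  have hlen : ((headers.filter (fun c => !(c == ""))).map PySem.Str.lower).length
      = headers.countP (fun h => !(h == "")) := by
    simp [← List.countP_eq_length_filter]
  rw [hmatch, hlen]
  ring
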